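-- pv_equiv track=rewrite | github.com/MrBrantCode/unitest_baseline | mut_generate/mist_train_cf/cf_18725/solution.py | calculate_equation_result
-- ===== SOURCE A (Python) =====
-- def calculate_equation_result(n):
--     result = 0
--     modulo = int(1e9) + 7
--
--     for i in range(1, n+1):
--         x = i
--         result += (x*i - (2*i-1))**2
--         result %= modulo
--
--     return result
-- ===== SOURCE B (Python) =====
-- def calculate_equation_result(n):
--     # Closed form: sum_{i=1}^{n} (i-1)^4 = (n-1)n(2n-1)(3n^2-3n-1)/30, computed mod 1e9+7.
--     MOD = int(1e9) + 7
--     if n <= 0: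
--         return 0
--     inv30 = pow(30, MOD - 2, MOD)
--     prod = (n - 1) % MOD
--     prod = prod * (n % MOD) % MOD
--     prod = prod * ((2 * n - 1) % MOD) % MOD
--     prod = prod * ((3 * n * n - 3 * n - 1) % MOD) % MOD
--     return prod * inv30 % MOD
-- ===== Notes on version B (the rewrite author's own statement) =====
-- stated objective: faster
-- what changed: Replaced the O(n) accumulation loop by the Faulhaber closed form for the sum of fourth powers, evaluated mod 1e9+7 with the modular inverse of 30 (Fermat exponentiation).
import Mathlib
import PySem

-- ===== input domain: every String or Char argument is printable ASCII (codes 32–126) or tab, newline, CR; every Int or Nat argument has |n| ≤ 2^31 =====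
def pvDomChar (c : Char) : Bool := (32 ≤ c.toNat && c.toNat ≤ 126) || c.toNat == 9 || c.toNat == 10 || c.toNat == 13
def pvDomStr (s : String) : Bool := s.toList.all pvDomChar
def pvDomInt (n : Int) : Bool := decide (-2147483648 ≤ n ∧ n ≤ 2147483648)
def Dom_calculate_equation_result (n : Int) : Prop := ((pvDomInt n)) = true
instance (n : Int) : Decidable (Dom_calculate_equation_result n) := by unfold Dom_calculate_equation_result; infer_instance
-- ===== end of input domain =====

-- B replaces A's O(n) accumulation loop by the Faulhaber closed form for the sum
-- of fourth powers mod 1e9+7, using the modular inverse of 30 (objective: faster).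

-- ===== PORT A =====
def calculate_equation_result (n : Int) : Int :=
  (PySem.List.pyRange 1 (n + 1) 1).foldl
    (fun result i =>
      let x := i
      PySem.Int.mod (result + (x * i - (2 * i - 1)) ^ 2) 1000000007) 0

-- ===== PORT B =====
-- port of Python's three-argument pow(b, e, m) for m > 0: square-and-multiply;
-- the fuel 64 only bounds the recursion depth (log2 e < 64 for every exponent used)
def pvPowModGo : Nat → Int → Nat → Int → Int
  | 0, _, _, m => PySem.Int.mod 1 m
  | fuel + 1, b, e, m =>
    if e = 0 then PySem.Int.mod 1 m
    else
      let h := pvPowModGo fuel b (e / 2) m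
      let h2 := PySem.Int.mod (h * h) m
      if e % 2 = 1 then PySem.Int.mod (h2 * b) m else h2

def pvPowMod (b : Int) (e : Nat) (m : Int) : Int := pvPowModGo 64 b e m

def calculate_equation_result_alt (n : Int) : Int :=
  if n ≤ 0 then 0
  else
    let MOD : Int := 1000000007
    let inv30 := pvPowMod 30 1000000005 MOD
    let prod := PySem.Int.mod (n - 1) MOD
    let prod := PySem.Int.mod (prod * PySem.Int.mod n MOD) MOD
    let prod := PySem.Int.mod (prod * PySem.Int.mod (2 * n - 1) MOD) MOD
    let prod := PySem.Int.mod (prod * PySem.Int.mod (3 * n * n - 3 * n - 1) MOD) MOD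
    PySem.Int.mod (prod * inv30) MOD

-- ===== PRECONDITION & SPEC =====
def Spec_calculate_equation_result (n : Int) (out : Int) : Prop := out = calculate_equation_result_alt n
instance (n : Int) (out : Int) : Decidable (Spec_calculate_equation_result n out) := by unfold Spec_calculate_equation_result; infer_instance

-- ===== CLAIM (what is proved, stated in full; the proofs are below) =====
def Claim_equal_calculate_equation_result : Prop := ∀ (n : Int), Dom_calculate_equation_result n → Spec_calculate_equation_result n (calculate_equation_result n)

-- ===== LEMMAS AND PROOFS =====

-- the sum A accumulates: ∑_{i=1}^{m} (i-1)^4 = ∑_{k<m} k^4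
def pvS (m : Nat) : Int := ∑ k ∈ Finset.range m, (k : Int) ^ 4

lemma pv_loopA (m : Nat) :
    calculate_equation_result (m : Int) = pvS m % 1000000007 := by
  unfold calculate_equation_result
  induction m with
  | zero => simp [PySem.List.pyRange_one_eq_nil, pvS]
  | succ m ih =>
    rw [show (((m + 1 : Nat) : Int) + 1) = ((m : Int) + 1) + 1 by push_cast; ring]
    rw [PySem.List.pyRange_one_succ_right (by omega : (1 : Int) ≤ (m : Int) + 1)]
    rw [List.foldl_append]
    rw [ih]
    simp only [List.foldl_cons, List.foldl_nil]
    rw [PySem.Int.mod_eq_emod_of_pos (by norm_num)]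
    have hx : (((m : Int) + 1) * ((m : Int) + 1) - (2 * ((m : Int) + 1) - 1)) ^ 2
        = ((m : Int)) ^ 4 := by ring
    rw [hx, show pvS (m + 1) = pvS m + (m : Int) ^ 4 from Finset.sum_range_succ _ m]
    unfold pvS
    omega

lemma pv_faulhaber (m : Nat) :
    30 * pvS m = ((m : Int) - 1) * m * (2 * m - 1) * (3 * (m : Int) * m - 3 * m - 1) := by
  induction m with
  | zero => simp [pvS]
  | succ m ih =>
    rw [pvS, Finset.sum_range_succ, ← pvS]
    push_cast
    push_cast at ih
    linear_combination ih

set_option maxRecDepth 10000 in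
lemma pv_inv30 : pvPowMod 30 1000000005 1000000007 = 233333335 := by decide

-- ===== VERDICT (by name: the statement is the Claim_ definition above) =====
theorem calculate_equation_result_spec : Claim_equal_calculate_equation_result := by
  intro n _
  unfold Spec_calculate_equation_result
  by_cases hn : n ≤ 0
  · unfold calculate_equation_result calculate_equation_result_alt
    rw [if_pos hn, PySem.List.pyRange_one_eq_nil (by omega)]
    rfl
  · rw [not_le] at hn
    obtain ⟨m, rfl⟩ : ∃ m : Nat, n = (m : Int) := ⟨n.toNat, (Int.toNat_of_nonneg hn.le).symm⟩
    rw [pv_loopA]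
    unfold calculate_equation_result_alt
    rw [if_neg (by omega)]
    simp only [pv_inv30]
    simp only [PySem.Int.mod_eq_emod_of_pos (by norm_num : (0:Int) < 1000000007)]
    set N : Int := (m : Int)
    have hcollapse :
        ((((N - 1) % 1000000007 * (N % 1000000007)) % 1000000007 *
            ((2 * N - 1) % 1000000007)) % 1000000007 *
            ((3 * N * N - 3 * N - 1) % 1000000007)) % 1000000007 * 233333335 % 1000000007
        = ((N - 1) * N * (2 * N - 1) * (3 * N * N - 3 * N - 1) * 233333335) % 1000000007 := by
      conv_rhs => rw [Int.mul_emod, Int.mul_emod ((N-1)*N*(2*N-1)), Int.mul_emod ((N-1)*N),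
        Int.mul_emod (N-1)]
      norm_num
    rw [hcollapse]
    have key : pvS m ≡ (N - 1) * N * (2 * N - 1) * (3 * N * N - 3 * N - 1) * 233333335
        [ZMOD 1000000007] := by
      have h1 : (1 : Int) ≡ 30 * 233333335 [ZMOD 1000000007] := by decide
      calc pvS m = pvS m * 1 := by ring
        _ ≡ pvS m * (30 * 233333335) [ZMOD 1000000007] := Int.ModEq.mul_left _ h1
        _ = (30 * pvS m) * 233333335 := by ring
        _ = (N - 1) * N * (2 * N - 1) * (3 * N * N - 3 * N - 1) * 233333335 := by
            rw [pv_faulhaber]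
    exact key
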